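-- pv_equiv track=rewrite | github.com/ShahJahanIshaq/aoc-2024 | day-04/py/part1.py | getMainDiagonalCount
-- ===== SOURCE A (Python) =====
-- def getMainDiagonalCount(grid, searchString) -> int:
--     searchString = list(searchString)
--     count = 0
--     for i in range(len(grid) - len(searchString) + 1):
--         for j in range(len(grid[i]) - len(searchString) + 1):
--             word = []
--             for k in range(len(searchString)):
--                 word.append(grid[i + k][j + k])
--             if word == searchString or word == searchString[::-1]:
--                 count += 1
--     return count
-- ===== SOURCE B (Python) =====
-- def getMainDiagonalCount(grid, searchString) -> int:
--     target = list(searchString)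
--     rtarget = target[::-1]
--     L = len(target)
--     count = 0
--     for i in range(len(grid) - L + 1):
--         limit = max(len(grid[i]) - L + 1, 0)
--         shifted = [grid[i + k][k:] for k in range(L)]
--         for word in list(zip(*shifted))[:limit]:
--             w = list(word)
--             if w == target or w == rtarget:
--                 count += 1
--     return count
-- ===== Notes on version B (the rewrite author's own statement) =====
-- stated objective: alternative
-- what changed: B drops the innermost per-cell indexing loop: for each start row it slices the next L rows by their diagonal offset and transposes them with zip, so each diagonal word comes from a transposition of shifted rows instead of L indexed lookups.
import Mathlib
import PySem

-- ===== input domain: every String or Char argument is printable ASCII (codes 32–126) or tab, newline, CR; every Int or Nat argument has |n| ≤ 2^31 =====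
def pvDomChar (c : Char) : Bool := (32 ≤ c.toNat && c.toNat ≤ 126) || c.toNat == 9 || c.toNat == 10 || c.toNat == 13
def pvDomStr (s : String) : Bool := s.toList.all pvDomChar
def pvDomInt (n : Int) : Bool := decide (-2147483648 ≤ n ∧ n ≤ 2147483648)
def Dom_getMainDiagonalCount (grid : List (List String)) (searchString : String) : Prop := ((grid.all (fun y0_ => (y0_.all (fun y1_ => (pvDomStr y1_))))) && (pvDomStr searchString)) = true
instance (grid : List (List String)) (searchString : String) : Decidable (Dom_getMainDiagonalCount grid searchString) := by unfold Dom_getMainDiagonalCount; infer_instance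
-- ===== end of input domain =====

-- B replaces the innermost per-cell indexing loop by a zip (transposition) of diagonal-shifted row slices; same asymptotic cost, different structure.

-- ===== PORT A =====
def getMainDiagonalCount (grid : List (List String)) (searchString : String) : Int :=
  let ss : List String := searchString.toList.map (fun c => String.ofList [c])
  (PySem.List.pyRange 0 ((grid.length : Int) - ss.length + 1) 1).foldl (fun count i =>
    (PySem.List.pyRange 0 (((PySem.List.pyGetD grid i ([] : List String)).length : Int) - ss.length + 1) 1).foldl (fun count j =>
      let word := (PySem.List.pyRange 0 (ss.length : Int) 1).foldl (fun w k =>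
        w ++ [PySem.List.pyGetD (PySem.List.pyGetD grid (i + k) ([] : List String)) (j + k) ""]) []
      if word = ss ∨ word = ss.reverse then count + 1 else count) count) 0

-- ===== PORT B =====
-- helper for the port's termination, cited by name in decreasing_by
theorem pvZip_tail_lt (rows : List (List String)) (h : ¬(rows = [] ∨ rows.any (·.isEmpty) = true)) :
    ((rows.map List.tail).headD []).length < (rows.headD []).length := by
  cases rows with
  | nil => exact absurd (Or.inl rfl) h
  | cons r rs =>
    cases r with
    | nil => exact absurd (Or.inr (List.any_eq_true.mpr ⟨[], by simp⟩)) h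
    | cons a as => simp

-- zip(*rows): transpose truncated to the shortest row (empty for zero rows)
def pvZip (rows : List (List String)) : List (List String) :=
  if h : rows = [] ∨ rows.any (·.isEmpty) = true then []
  else (rows.map (fun r => r.headD "")) :: pvZip (rows.map List.tail)
termination_by (rows.headD []).length
decreasing_by simpa using pvZip_tail_lt rows h

def getMainDiagonalCount_alt (grid : List (List String)) (searchString : String) : Int :=
  let target : List String := searchString.toList.map (fun c => String.ofList [c])
  let rtarget := target.reverse
  let L : Int := target.length
  (PySem.List.pyRange 0 ((grid.length : Int) - L + 1) 1).foldl (fun count i =>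
    let limit := max (((PySem.List.pyGetD grid i ([] : List String)).length : Int) - L + 1) 0
    let shifted := (PySem.List.pyRange 0 L 1).map (fun k =>
      PySem.List.slice (PySem.List.pyGetD grid (i + k) ([] : List String)) (some k) none)
    (PySem.List.slice (pvZip shifted) none (some limit)).foldl (fun count w =>
      if w = target ∨ w = rtarget then count + 1 else count) count) 0

-- ===== PRECONDITION & SPEC =====
-- Pre_ excludes exactly the inputs where Python A raises IndexError: an empty searchString (the
-- outer range then indexes grid[len(grid)]) and ragged grids where some in-range diagonal
-- window reaches past the end of a later row (grid[i+k][j+k]).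
def Pre_getMainDiagonalCount (grid : List (List String)) (searchString : String) : Prop :=
  searchString.toList ≠ [] ∧
  ∀ i < grid.length, ∀ k < searchString.toList.length, ∀ j < (grid.getD i []).length,
    i + searchString.toList.length ≤ grid.length →
    j + searchString.toList.length ≤ (grid.getD i []).length →
    j + k < (grid.getD (i + k) []).length
instance (grid : List (List String)) (searchString : String) : Decidable (Pre_getMainDiagonalCount grid searchString) := by unfold Pre_getMainDiagonalCount; infer_instance

def pvWitness_getMainDiagonalCount : List (List String) × String := ([["M", "A"], ["X", "S"]], "MS")

def Spec_getMainDiagonalCount (grid : List (List String)) (searchString : String) (out : Int) : Prop := out = getMainDiagonalCount_alt grid searchString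
instance (grid : List (List String)) (searchString : String) (out : Int) : Decidable (Spec_getMainDiagonalCount grid searchString out) := by unfold Spec_getMainDiagonalCount; infer_instance

-- ===== CLAIM (what is proved, stated in full; the proofs are below) =====
def Claim_equal_getMainDiagonalCount : Prop := ∀ (grid : List (List String)) (searchString : String), Dom_getMainDiagonalCount grid searchString → Pre_getMainDiagonalCount grid searchString → Spec_getMainDiagonalCount grid searchString (getMainDiagonalCount grid searchString)

-- ===== LEMMAS AND PROOFS =====

theorem pvZip_cond_elim (rows : List (List String)) (h : ¬(rows = [] ∨ rows.any (·.isEmpty) = true)) :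
    ∀ r ∈ rows, r ≠ [] := by
  intro r hr hc
  exact h (Or.inr (List.any_eq_true.mpr ⟨r, hr, by simp [hc]⟩))

theorem pvZip_getElem? (rows : List (List String)) (hne : rows ≠ []) (j : Nat) :
    (pvZip rows)[j]? =
      if ∀ r ∈ rows, j < r.length then some (rows.map (fun r => r.getD j "")) else none := by
  induction j generalizing rows with
  | zero =>
    rw [pvZip.eq_def]
    by_cases h : rows = [] ∨ rows.any (·.isEmpty) = true
    · rw [dif_pos h]
      rcases h with h | h
      · exact absurd h hne
      · obtain ⟨r, hr, hre⟩ := List.any_eq_true.mp h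
        rw [if_neg]
        · simp
        · intro hall
          have h1 := hall r hr
          have h2 : r = [] := by simpa [List.isEmpty_iff] using hre
          simp [h2] at h1
    · rw [dif_neg h]
      have hnonempty := pvZip_cond_elim rows h
      rw [if_pos]
      · simp only [List.getElem?_cons_zero]
        congr 1
        apply List.map_congr_left
        intro r hr
        cases r with
        | nil => exact absurd rfl (hnonempty _ hr)
        | cons a as => simp
      · intro r hr
        cases r with
        | nil => exact absurd rfl (hnonempty _ hr)
        | cons a as => simp
  | succ j ih =>
    rw [pvZip.eq_def]
    by_cases h : rows = [] ∨ rows.any (·.isEmpty) = true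
    · rw [dif_pos h]
      rcases h with h | h
      · exact absurd h hne
      · obtain ⟨r, hr, hre⟩ := List.any_eq_true.mp h
        rw [if_neg]
        · simp
        · intro hall
          have h1 := hall r hr
          have h2 : r = [] := by simpa [List.isEmpty_iff] using hre
          simp [h2] at h1
    · rw [dif_neg h]
      have hnonempty := pvZip_cond_elim rows h
      have hmapne : rows.map List.tail ≠ [] := by simpa using hne
      rw [List.getElem?_cons_succ, ih _ hmapne]
      by_cases hc : ∀ r ∈ rows, j + 1 < r.length
      · rw [if_pos, if_pos hc]
        · rw [List.map_map]
          apply congrArg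
          apply List.map_congr_left
          intro r hr
          cases r with
          | nil => exact absurd rfl (hnonempty _ hr)
          | cons a as => simp
        · intro t ht
          obtain ⟨r, hr, rfl⟩ := List.mem_map.mp ht
          have h1 := hc r hr
          cases r with
          | nil => simp at h1
          | cons a as => simpa using h1
      · rw [if_neg, if_neg hc]
        intro hall
        apply hc
        intro r hr
        have h1 := hall r.tail (List.mem_map.mpr ⟨r, hr, rfl⟩)
        cases r with
        | nil => exact absurd rfl (hnonempty _ hr)
        | cons a as => simpa using h1

theorem foldl_append_singleton {α β : Type} (f : α → β) (l : List α) (init : List β) :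
    l.foldl (fun w k => w ++ [f k]) init = init ++ l.map f := by
  induction l generalizing init with
  | nil => simp
  | cons a as ih => simp [ih]

-- ===== VERDICT (by name: the statement is the Claim_ definition above) =====
theorem getMainDiagonalCount_spec : Claim_equal_getMainDiagonalCount := by
  unfold Claim_equal_getMainDiagonalCount Spec_getMainDiagonalCount
  intro grid s _ hpre
  obtain ⟨hsne, hrag⟩ := hpre
  unfold getMainDiagonalCount getMainDiagonalCount_alt
  simp only []
  set ss : List String := s.toList.map (fun c => String.ofList [c]) with hss
  have hLss : ss.length = s.toList.length := by simp [hss]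
  set LN : Nat := s.toList.length with hLN
  have hL1 : 1 ≤ LN := by
    cases hs : s.toList with
    | nil => exact absurd hs hsne
    | cons a as => simp [hLN, hs]
  apply PySem.List.foldl_congr_mem
  intro count i hi
  rw [PySem.List.mem_pyRange_one] at hi
  obtain ⟨hi0, hiub⟩ := hi
  obtain ⟨iN, rfl⟩ := Int.eq_ofNat_of_zero_le hi0
  have hiR : iN + LN ≤ grid.length := by rw [hLss] at hiub; omega
  have hrow : PySem.List.pyGetD grid (iN : Int) ([] : List String) = grid.getD iN [] := by
    rw [PySem.List.pyGetD_natCast]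
  set row : List String := grid.getD iN [] with hrowdef
  rw [hrow]
  rw [PySem.List.foldl_ite_add_one, PySem.List.foldl_ite_add_one]
  congr 1
  have hlim0 : (0 : Int) ≤ max ((row.length : Int) - ss.length + 1) 0 := le_max_right _ _
  rw [PySem.List.slice_to _ hlim0]
  set m : Nat := ((row.length : Int) - (LN : Int) + 1).toNat with hm
  have hmax : (max ((row.length : Int) - ss.length + 1) 0).toNat = m := by
    rw [hLss, hm]; omega
  rw [hmax]
  apply congrArg
  have hwords :
      (PySem.List.pyRange 0 ((row.length : Int) - (ss.length : Int) + 1) 1).map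
          (fun j => (PySem.List.pyRange 0 ((ss.length : Int)) 1).foldl
            (fun w k => w ++ [PySem.List.pyGetD (PySem.List.pyGetD grid ((iN : Int) + k) ([] : List String)) (j + k) ""]) []) =
        (pvZip ((PySem.List.pyRange 0 ((ss.length : Int)) 1).map (fun k =>
          PySem.List.slice (PySem.List.pyGetD grid ((iN : Int) + k) ([] : List String)) (some k) none))).take m := by
    set shifted : List (List String) := (PySem.List.pyRange 0 ((ss.length : Int)) 1).map (fun k =>
      PySem.List.slice (PySem.List.pyGetD grid ((iN : Int) + k) ([] : List String)) (some k) none) with hshift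
    have hsliceform : ∀ kN : Nat,
        PySem.List.slice (PySem.List.pyGetD grid ((iN : Int) + (kN : Int)) ([] : List String)) (some (kN : Int)) none
          = (grid.getD (iN + kN) []).drop kN := by
      intro kN
      have h0 : ((iN : Int) + (kN : Int)) = ((iN + kN : Nat) : Int) := by push_cast; ring
      rw [h0, PySem.List.pyGetD_natCast, PySem.List.slice_from_natCast]
    have hshiftne : shifted ≠ [] := by
      rw [hshift]
      intro hc
      have hlen := congrArg List.length hc
      rw [List.length_map, PySem.List.length_pyRange_one] at hlen
      rw [hLss] at hlen
      simp at hlen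
      omega
    have hmm' : ((row.length : Int) - (ss.length : Int) + 1 - 0).toNat = m := by
      rw [hm, hLss]; omega
    apply List.ext_getElem?
    intro j
    rw [List.getElem?_take, List.getElem?_map, PySem.List.getElem?_pyRange_one, hmm']
    by_cases hj : j < m
    · rw [if_pos hj, if_pos hj]
      simp only [Option.map_some]
      have hjrow : j + LN ≤ row.length := by rw [hm] at hj; omega
      have hcell : ∀ k < LN, j + k < (grid.getD (iN + k) []).length := by
        intro k hk
        have hiNlt : iN < grid.length := by omega
        exact hrag iN hiNlt k hk j (by rw [← hrowdef]; omega) hiR (by rw [← hrowdef]; exact hjrow)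
      have hmemform : ∀ r ∈ shifted, ∃ kN : Nat, kN < LN ∧ r = (grid.getD (iN + kN) []).drop kN := by
        intro r hr
        rw [hshift] at hr
        obtain ⟨k, hkmem, rfl⟩ := List.mem_map.mp hr
        rw [PySem.List.mem_pyRange_one] at hkmem
        obtain ⟨hk0, hkub⟩ := hkmem
        obtain ⟨kN, rfl⟩ := Int.eq_ofNat_of_zero_le hk0
        refine ⟨kN, by rw [hLss] at hkub; omega, ?_⟩
        exact hsliceform kN
      rw [pvZip_getElem? shifted hshiftne j, if_pos]
      · apply congrArg
        rw [foldl_append_singleton]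
        simp only [List.nil_append]
        rw [hshift, List.map_map]
        apply List.map_congr_left
        intro k hkmem
        rw [PySem.List.mem_pyRange_one] at hkmem
        obtain ⟨hk0, hkub⟩ := hkmem
        obtain ⟨kN, rfl⟩ := Int.eq_ofNat_of_zero_le hk0
        simp only [Function.comp]
        rw [hsliceform kN]
        have h1 : ((0 : Int) + (j : Int) + (kN : Int)) = ((j + kN : Nat) : Int) := by push_cast; ring
        rw [h1, PySem.List.pyGetD_natCast]
        rw [List.getD_eq_getElem?_getD, List.getD_eq_getElem?_getD, List.getElem?_drop]
        have h0 : ((iN : Int) + (kN : Int)) = ((iN + kN : Nat) : Int) := by push_cast; ring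
        rw [h0, PySem.List.pyGetD_natCast, Nat.add_comm j kN]
      · intro r hr
        obtain ⟨kN, hkN, rfl⟩ := hmemform r hr
        rw [List.length_drop]
        have := hcell kN hkN
        omega
    · rw [if_neg hj, if_neg hj]
      simp
  calc (PySem.List.pyRange 0 ((row.length : Int) - (ss.length : Int) + 1) 1).countP
          (fun j => decide ((PySem.List.pyRange 0 ((ss.length : Int)) 1).foldl
            (fun w k => w ++ [PySem.List.pyGetD (PySem.List.pyGetD grid ((iN : Int) + k) ([] : List String)) (j + k) ""]) [] = ss ∨
            (PySem.List.pyRange 0 ((ss.length : Int)) 1).foldl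
            (fun w k => w ++ [PySem.List.pyGetD (PySem.List.pyGetD grid ((iN : Int) + k) ([] : List String)) (j + k) ""]) [] = ss.reverse))
      = ((PySem.List.pyRange 0 ((row.length : Int) - (ss.length : Int) + 1) 1).map
          (fun j => (PySem.List.pyRange 0 ((ss.length : Int)) 1).foldl
            (fun w k => w ++ [PySem.List.pyGetD (PySem.List.pyGetD grid ((iN : Int) + k) ([] : List String)) (j + k) ""]) [])).countP
          (fun w => decide (w = ss ∨ w = ss.reverse)) := by
        rw [List.countP_map]; rfl
    _ = _ := by rw [hwords]
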